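-- pv_equiv track=rewrite | github.com/OJFlavours/Tamriel-Adventure | ui.py | capitalize_dialogue
-- ===== SOURCE A (Python) =====
-- def capitalize_dialogue(text: str) -> str:
--     """
--     Capitalizes the first letter of sentences and fixes standalone 'i' to 'I'.
--     Assumes basic sentence structure.
--     """
--     if not text:
--         return ""
--
--     # Replace standalone 'i' or 'i ' with 'I' or 'I '
--     processed_text = text.replace(" i ", " I ").replace(" i'", " I'").replace("i'm", "I'm").replace("i've", "I've")
--     if processed_text.startswith("i "): # Catch initial 'i ' at the very start
--         processed_text = "I" + processed_text[1:]
--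
--     # Capitalize the first letter of the overall string
--     if processed_text: # Ensure string is not empty before attempting to capitalize
--         processed_text = processed_text[0].upper() + processed_text[1:]
--
--     # Capitalize after sentence-ending punctuation.
--     punctuations = ['.', '!', '?']
--     for punc in punctuations:
--         parts = processed_text.split(punc)
--         for i, part in enumerate(parts):
--             stripped_part = part.strip()
--             if stripped_part:
--                 # Keep original leading/trailing spaces for proper re-joining
--                 original_leading_spaces = part[:(len(part) - len(part.lstrip()))]
--                 original_trailing_spaces = part[len(part.rstrip()):]
--
--                 capitalized_stripped = stripped_part[0].upper() + stripped_part[1:]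
--                 parts[i] = original_leading_spaces + capitalized_stripped + original_trailing_spaces
--         processed_text = punc.join(parts)
--
--     return processed_text
-- ===== SOURCE B (Python) =====
-- def capitalize_dialogue(text: str) -> str:
--     """Single left-to-right scan replacing A's three split/strip/join passes."""
--     if not text:
--         return ""
--     t = text.replace(" i ", " I ").replace(" i'", " I'").replace("i'm", "I'm").replace("i've", "I've")
--     if t.startswith("i "):
--         t = "I" + t[1:]
--     out = []
--     cap = True
--     for ch in t:
--         if cap and not ch.isspace():
--             out.append(ch.upper())
--             cap = False
--         else:
--             out.append(ch)
--         if ch in ".!?":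
--             cap = True
--     return "".join(out)
-- ===== Notes on version B (the rewrite author's own statement) =====
-- stated objective: simpler
-- what changed: A's three split/strip/join passes (one per sentence-ending punctuation mark) are replaced by a single left-to-right scan that keeps a capitalize-next flag; the pronoun-replace prefix and guards are unchanged.
import Mathlib
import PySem

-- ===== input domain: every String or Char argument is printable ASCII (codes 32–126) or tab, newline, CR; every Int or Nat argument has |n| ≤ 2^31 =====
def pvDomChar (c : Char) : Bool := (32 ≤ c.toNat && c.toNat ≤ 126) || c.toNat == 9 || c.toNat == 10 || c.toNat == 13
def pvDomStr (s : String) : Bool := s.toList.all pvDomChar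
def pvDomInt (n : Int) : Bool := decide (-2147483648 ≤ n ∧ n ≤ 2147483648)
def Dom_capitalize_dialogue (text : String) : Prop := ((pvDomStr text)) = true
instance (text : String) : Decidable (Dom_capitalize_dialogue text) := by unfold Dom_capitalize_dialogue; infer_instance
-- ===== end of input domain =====

-- B replaces A's three per-punctuation split/strip/join passes by one left-to-right scan with a
-- capitalize-next flag (objective: simpler); the pronoun-replace prefix is kept as in A.

-- ===== PORT A =====
-- Both ports work on text.toList; each Python primitive is the corresponding PySem.Chars function.
-- the replace chain and the initial-pronoun fix — the identical shared prefix of A's and Source B's code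
def capPre (text : String) : List Char :=
  let t := PySem.Chars.replace (PySem.Chars.replace (PySem.Chars.replace (PySem.Chars.replace
            text.toList [' ','i',' '] [' ','I',' ']) [' ','i','\''] [' ','I','\''])
            ['i','\'','m'] ['I','\'','m']) ['i','\'','v','e'] ['I','\'','v','e']
  if PySem.Chars.startswith t ['i',' '] then 'I' :: PySem.List.slice t (some 1) none else t

-- one iteration of A's `for punc in punctuations` loop: split, fix each part in place (enumerate + set), re-join
def capPassA (punc : Char) (s : List Char) : List Char :=
  let parts := PySem.Chars.splitOn s [punc]
  let parts := (PySem.List.enumerate parts).foldl (fun acc ip =>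
    let part := ip.2
    let stripped := PySem.Chars.strip part
    if stripped ≠ [] then
      let leading := PySem.List.slice part none (some ((part.length : Int) - ((PySem.Chars.lstrip part).length : Int)))
      let trailing := PySem.List.slice part (some ((PySem.Chars.rstrip part).length : Int)) none
      let capitalized := match stripped with
        | [] => []
        | c :: rest => PySem.Chars.upperChar c :: rest
      acc.set ip.1.toNat (leading ++ capitalized ++ trailing)
    else acc) parts
  PySem.Chars.join [punc] parts

def capitalize_dialogue (text : String) : String :=
  if text = "" then "" else
  let t := capPre text
  -- processed_text[0].upper() + processed_text[1:] under the `if processed_text:` guard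
  let t2 := match t with
    | [] => t
    | c :: _ => PySem.Chars.upperChar c :: PySem.List.slice t (some 1) none
  String.ofList (['.', '!', '?'].foldl (fun s punc => capPassA punc s) t2)

-- ===== PORT B =====
-- Source B opens with the identical replace chain and initial-pronoun fix; it is capPre, defined once above.
-- Source B's single scan: state = (out, cap); consume cap on a non-space char, then ".!?" re-arms it
def capScanB (t : List Char) : List Char :=
  (t.foldl (fun (st : List Char × Bool) ch =>
      let st2 := if st.2 && !(PySem.Chars.isspace ch) then (st.1 ++ [PySem.Chars.upperChar ch], false)
                 else (st.1 ++ [ch], st.2)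
      (st2.1, if ch = '.' ∨ ch = '!' ∨ ch = '?' then true else st2.2)) ([], true)).1

def capitalize_dialogue_alt (text : String) : String :=
  if text = "" then "" else String.ofList (capScanB (capPre text))


-- ===== PRECONDITION & SPEC =====
def Spec_capitalize_dialogue (text : String) (out : String) : Prop := out = capitalize_dialogue_alt text
instance (text : String) (out : String) : Decidable (Spec_capitalize_dialogue text out) := by unfold Spec_capitalize_dialogue; infer_instance

-- ===== CLAIM (what is proved, stated in full; the proofs are below) =====
def Claim_equal_capitalize_dialogue : Prop := ∀ (text : String), Dom_capitalize_dialogue text → Spec_capitalize_dialogue text (capitalize_dialogue text)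

-- ===== LEMMAS AND PROOFS =====

lemma char_le_iff (a b : Char) : a ≤ b ↔ a.toNat ≤ b.toNat := by
  rw [Char.le_def, UInt32.le_iff_toNat_le]; exact Iff.rfl
lemma char_eq_iff (a b : Char) : a = b ↔ a.toNat = b.toNat := by
  constructor
  · intro h; rw [h]
  · intro h; apply Char.ext; exact UInt32.toNat_inj.mp h
lemma islower_iff (c : Char) : PySem.Chars.islower c = true ↔ 97 ≤ c.toNat ∧ c.toNat ≤ 122 := by
  simp [PySem.Chars.islower, char_le_iff]
lemma isspace_false_of_bounds (c : Char) (h1 : 65 ≤ c.toNat) (h2 : c.toNat ≤ 122) :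
    PySem.Chars.isspace c = false := by simp [PySem.Chars.isspace]; omega
lemma toNat_upper_lower (c : Char) (h : PySem.Chars.islower c = true) :
    (PySem.Chars.upperChar c).toNat = c.toNat - 32 ∧ 97 ≤ c.toNat ∧ c.toNat ≤ 122 := by
  obtain ⟨h1, h2⟩ := (islower_iff c).mp h
  have hv : Nat.isValidChar (c.toNat - 32) := by left; omega
  refine ⟨?_, h1, h2⟩
  simp [PySem.Chars.upperChar, h, Char.ofNat, hv]
lemma upC_of_not_lower (c : Char) (h : PySem.Chars.islower c = false) :
    PySem.Chars.upperChar c = c := by simp [PySem.Chars.upperChar, h]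
lemma ws_upC (c : Char) : PySem.Chars.isspace (PySem.Chars.upperChar c) = PySem.Chars.isspace c := by
  by_cases h : PySem.Chars.islower c = true
  · obtain ⟨h1, h2, h3⟩ := toNat_upper_lower c h
    rw [isspace_false_of_bounds _ (by omega) (by omega), isspace_false_of_bounds _ (by omega) (by omega)]
  · rw [upC_of_not_lower c (by revert h; cases PySem.Chars.islower c <;> simp)]
lemma upC_upC (c : Char) : PySem.Chars.upperChar (PySem.Chars.upperChar c) = PySem.Chars.upperChar c := by
  by_cases h : PySem.Chars.islower c = true
  · obtain ⟨h1, h2, h3⟩ := toNat_upper_lower c h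
    apply upC_of_not_lower
    rw [← Bool.not_eq_true]
    intro hcon
    obtain ⟨g1, g2⟩ := (islower_iff _).mp hcon
    omega
  · rw [upC_of_not_lower c (by revert h; cases PySem.Chars.islower c <;> simp),
        upC_of_not_lower c (by revert h; cases PySem.Chars.islower c <;> simp)]
lemma upC_eq_iff (c p : Char) (hp : p.toNat < 65 ∨ 90 < p.toNat) (hp2 : p.toNat < 97 ∨ 122 < p.toNat) :
    (PySem.Chars.upperChar c = p) ↔ c = p := by
  by_cases h : PySem.Chars.islower c = true
  · obtain ⟨h1, h2, h3⟩ := toNat_upper_lower c h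
    rw [char_eq_iff, char_eq_iff]
    omega
  · rw [upC_of_not_lower c (by revert h; cases PySem.Chars.islower c <;> simp)]
lemma upC_of_ws (c : Char) (h : PySem.Chars.isspace c = true) : PySem.Chars.upperChar c = c := by
  apply upC_of_not_lower
  rw [← Bool.not_eq_true]
  intro hcon
  obtain ⟨g1, g2⟩ := (islower_iff _).mp hcon
  rw [isspace_false_of_bounds c (by omega) (by omega)] at h
  exact Bool.false_ne_true h

def scanG (P : Char → Bool) : Bool → List Char → List Char
  | _, [] => []
  | cap, c :: cs =>
      (if cap && !(PySem.Chars.isspace c) then PySem.Chars.upperChar c else c) ::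
      scanG P (if P c then true else if PySem.Chars.isspace c then cap else false) cs

def flagAfter (P : Char → Bool) (cap : Bool) (l : List Char) : Bool :=
  l.foldl (fun cap c => if P c then true else if PySem.Chars.isspace c then cap else false) cap

def capNW : List Char → List Char
  | [] => []
  | c :: cs => if PySem.Chars.isspace c then c :: capNW cs else PySem.Chars.upperChar c :: cs

lemma scan_append (P : Char → Bool) (l1 l2 : List Char) : ∀ cap,
    scanG P cap (l1 ++ l2) = scanG P cap l1 ++ scanG P (flagAfter P cap l1) l2 := by
  induction l1 with
  | nil => intro cap; simp [scanG, flagAfter]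
  | cons c cs ih =>
    intro cap
    simp only [List.cons_append, scanG]
    rw [ih]
    rfl

lemma scanG_false (P : Char → Bool) (l : List Char) (h : ∀ c ∈ l, P c = false) :
    scanG P false l = l := by
  induction l with
  | nil => rfl
  | cons c cs ih =>
    have hc := h c (List.mem_cons_self ..)
    simp [scanG, hc]
    by_cases hw : PySem.Chars.isspace c = true <;>
      simp [ih (fun x hx => h x (List.mem_cons_of_mem _ hx))]

lemma scanG_true_no_p (P : Char → Bool) (l : List Char) (h : ∀ c ∈ l, P c = false) :
    scanG P true l = capNW l := by
  induction l with
  | nil => rfl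
  | cons c cs ih =>
    have hc := h c (List.mem_cons_self ..)
    by_cases hw : PySem.Chars.isspace c = true
    · simp [scanG, capNW, hc, hw, ih (fun x hx => h x (List.mem_cons_of_mem _ hx))]
    · simp only [Bool.not_eq_true] at hw
      simp [scanG, capNW, hc, hw, scanG_false P cs (fun x hx => h x (List.mem_cons_of_mem _ hx))]

lemma capNW_all_ws (l : List Char) (h : ∀ c ∈ l, PySem.Chars.isspace c = true) : capNW l = l := by
  induction l with
  | nil => rfl
  | cons c cs ih =>
    simp [capNW, h c (List.mem_cons_self ..), ih (fun x hx => h x (List.mem_cons_of_mem _ hx))]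

lemma capNW_ws_append (l m : List Char) (h : ∀ c ∈ l, PySem.Chars.isspace c = true) :
    capNW (l ++ m) = l ++ capNW m := by
  induction l with
  | nil => rfl
  | cons c cs ih =>
    simp [capNW, h c (List.mem_cons_self ..), ih (fun x hx => h x (List.mem_cons_of_mem _ hx))]

lemma splitOn_go_eq (p : Char) : ∀ (fuel : Nat) (l cur : List Char) (accs : List (List Char)) (_ : l.length ≤ fuel),
    PySem.Chars.splitOn.go [p] fuel l cur accs = accs.reverse ++ (List.splitOnP (· == p) l).modifyHead (cur.reverse ++ ·) := by
  intro fuel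
  induction fuel with
  | zero =>
    intro l cur accs h
    have : l = [] := List.length_eq_zero_iff.mp (Nat.le_zero.mp h)
    subst this
    simp [PySem.Chars.splitOn.go, List.splitOnP_nil]
  | succ n ih =>
    intro l cur accs h
    cases l with
    | nil => simp [PySem.Chars.splitOn.go, List.splitOnP_nil]
    | cons c rest =>
      rw [PySem.Chars.splitOn.go]
      by_cases hc : c = p
      · subst hc
        have hpre : List.isPrefixOf [c] (c :: rest) = true := by simp [List.isPrefixOf]
        rw [if_pos hpre]
        rw [ih _ _ _ (by simpa using Nat.le_of_succ_le_succ h)]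
        simp [List.splitOnP_cons]
        exact congrFun List.modifyHead_id _
      · have hpre : List.isPrefixOf [p] (c :: rest) = false := by
          simp [List.isPrefixOf]
          intro hh
          exact absurd hh.symm hc
        rw [if_neg (by simp [hpre])]
        rw [ih _ _ _ (by simpa using Nat.le_of_succ_le_succ h)]
        have hc' : ((c == p) = false) := by simp [hc]
        simp [List.splitOnP_cons, hc', List.modifyHead_modifyHead]
        rfl

lemma splitOn_eq (p : Char) (s : List Char) :
    PySem.Chars.splitOn s [p] = List.splitOnP (· == p) s := by
  rw [PySem.Chars.splitOn, splitOn_go_eq p (s.length + 1) s [] [] (by omega)]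
  simp
  exact congrFun List.modifyHead_id _

lemma mem_splitOnP (q : Char → Bool) : ∀ (l : List Char), ∀ part ∈ List.splitOnP q l, ∀ c ∈ part, q c = false := by
  intro l
  induction l with
  | nil =>
    intro part hp c hc
    rw [List.splitOnP_nil] at hp
    simp at hp
    subst hp
    simp at hc
  | cons a l ih =>
    intro part hp c hc
    rw [List.splitOnP_cons] at hp
    by_cases ha : q a = true
    · rw [if_pos ha] at hp
      rcases List.mem_cons.mp hp with h1 | h2
      · subst h1; simp at hc
      · exact ih part h2 c hc
    · rw [if_neg ha] at hp
      obtain ⟨hd, tl, he⟩ := List.exists_cons_of_ne_nil (List.splitOnP_ne_nil q l)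
      rw [he] at hp
      simp only [List.modifyHead] at hp
      rcases List.mem_cons.mp hp with h1 | h2
      · subst h1
        rcases List.mem_cons.mp hc with h1' | h2'
        · subst h1'; simpa using ha
        · exact ih hd (by rw [he]; exact List.mem_cons_self ..) c h2'
      · exact ih part (by rw [he]; exact List.mem_cons_of_mem _ h2) c hc

lemma scan_join (P : Char → Bool) (p : Char) (hp : P p = true) (hup : PySem.Chars.upperChar p = p) :
    ∀ parts : List (List Char), (∀ part ∈ parts, ∀ c ∈ part, P c = false) →
      scanG P true (PySem.Chars.join [p] parts) = PySem.Chars.join [p] (parts.map capNW) := by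
  intro parts
  induction parts with
  | nil => intro _; rfl
  | cons x xs ih =>
    intro h
    cases xs with
    | nil =>
      simp [PySem.Chars.join, List.intercalate]
      exact scanG_true_no_p P x (h x (List.mem_cons_self ..))
    | cons y ys =>
      rw [PySem.Chars.join_cons_cons, scan_append]
      have hflag : flagAfter P true (x ++ [p]) = true := by
        simp [flagAfter, List.foldl_append, hp]
      rw [hflag, ih (fun part hpart => h part (List.mem_cons_of_mem _ hpart))]
      rw [scan_append P x [p], scanG_true_no_p P x (h x (List.mem_cons_self ..))]
      have hpscan : scanG P (flagAfter P true x) [p] = [p] := by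
        by_cases hf : flagAfter P true x = true <;> simp [hf, scanG, hup]
      rw [hpscan]
      simp only [List.map_cons]
      rw [PySem.Chars.join_cons_cons]

lemma foldl_enum_set {α : Type} (g : α → α) (cond : α → Prop) [DecidablePred cond] :
    ∀ (l pre : List α), (PySem.List.enumerate l (pre.length : Int)).foldl
        (fun acc ip => if cond ip.2 then acc.set ip.1.toNat (g ip.2) else acc) (pre ++ l)
      = pre ++ l.map (fun x => if cond x then g x else x) := by
  intro l
  induction l with
  | nil => intro pre; simp [PySem.List.enumerate_nil]
  | cons x xs ih =>
    intro pre
    rw [PySem.List.enumerate_cons, List.foldl_cons]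
    have hstep : (if cond x then (pre ++ x :: xs).set ((pre.length : Int)).toNat (g x) else pre ++ x :: xs)
        = (pre ++ [if cond x then g x else x]) ++ xs := by
      by_cases hc : cond x <;> simp [hc, Int.toNat_natCast]
    have hlen : ((pre.length : Int) + 1) = (((pre ++ [if cond x then g x else x]).length : Int)) := by
      simp
    calc (PySem.List.enumerate xs ((pre.length : Int) + 1)).foldl
            (fun acc ip => if cond ip.2 then acc.set ip.1.toNat (g ip.2) else acc)
            (if cond x then (pre ++ x :: xs).set ((pre.length : Int)).toNat (g x) else pre ++ x :: xs)
        = (PySem.List.enumerate xs (((pre ++ [if cond x then g x else x]).length : Int))).foldl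
            (fun acc ip => if cond ip.2 then acc.set ip.1.toNat (g ip.2) else acc)
            ((pre ++ [if cond x then g x else x]) ++ xs) := by rw [hstep, hlen]
      _ = (pre ++ [if cond x then g x else x]) ++ xs.map (fun x => if cond x then g x else x) := ih _
      _ = pre ++ (x :: xs).map (fun x => if cond x then g x else x) := by simp


lemma dropWhile_all_append (q : Char → Bool) : ∀ (l1 l2 : List Char), (∀ x ∈ l1, q x = true) →
    List.dropWhile q (l1 ++ l2) = List.dropWhile q l2 := by
  intro l1 l2
  induction l1 with
  | nil => intro _; rfl
  | cons a l ih =>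
    intro h1
    simp [List.dropWhile_cons, h1 a (List.mem_cons_self ..), ih (fun x hx => h1 x (List.mem_cons_of_mem _ hx))]

lemma part_fix_eq_capNW (part : List Char) :
    (if PySem.Chars.strip part ≠ [] then
       PySem.List.slice part none (some ((part.length : Int) - ((PySem.Chars.lstrip part).length : Int)))
       ++ (match PySem.Chars.strip part with
           | [] => []
           | c :: rest => PySem.Chars.upperChar c :: rest)
       ++ PySem.List.slice part (some ((PySem.Chars.rstrip part).length : Int)) none
     else part) = capNW part := by
  by_cases hs : PySem.Chars.strip part = []
  · rw [if_neg (by simpa using hs)]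
    have hM : PySem.Chars.lstrip part = [] := by
      by_contra hM
      obtain ⟨c, cs, he⟩ := List.exists_cons_of_ne_nil hM
      have hcw : PySem.Chars.isspace c = false := by
        have := List.head_dropWhile_not (PySem.Chars.isspace) (l := part) (by
          rw [show List.dropWhile PySem.Chars.isspace part = PySem.Chars.lstrip part from rfl, he]; simp)
        simpa [show List.dropWhile PySem.Chars.isspace part = PySem.Chars.lstrip part from rfl, he] using this
      rw [PySem.Chars.strip, he] at hs
      have hws : ∀ x ∈ (c :: cs).reverse, PySem.Chars.isspace x = true := by
        have := hs
        rw [PySem.Chars.rstrip] at this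
        simpa [List.dropWhile_eq_nil_iff] using this
      have := hws c (by simp)
      rw [hcw] at this
      exact Bool.false_ne_true this
    have hall : ∀ c ∈ part, PySem.Chars.isspace c = true := by
      have : List.dropWhile PySem.Chars.isspace part = [] := hM
      rw [List.dropWhile_eq_nil_iff] at this
      exact this
    exact (capNW_all_ws part hall).symm
  · rw [if_pos (by simpa using hs)]
    obtain ⟨c, rest, he⟩ := List.exists_cons_of_ne_nil hs
    set M := PySem.Chars.lstrip part with hMdef
    have hpartLM : List.takeWhile PySem.Chars.isspace part ++ M = part := List.takeWhile_append_dropWhile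
    have hMne : M ≠ [] := by
      intro hM0
      rw [PySem.Chars.strip, ← hMdef, hM0] at hs
      exact hs rfl
    have hMrev : List.takeWhile PySem.Chars.isspace M.reverse ++ List.dropWhile PySem.Chars.isspace M.reverse = M.reverse := List.takeWhile_append_dropWhile
    have hstripM : PySem.Chars.strip part = (List.dropWhile PySem.Chars.isspace M.reverse).reverse := by
      rw [PySem.Chars.strip, ← hMdef, PySem.Chars.rstrip]
    have hMdecomp : M = PySem.Chars.strip part ++ (List.takeWhile PySem.Chars.isspace M.reverse).reverse := by
      rw [hstripM]
      rw [← List.reverse_append, ← hMrev]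
      simp
    -- leading whitespace
    have hlenM : M.length ≤ part.length := by
      conv_rhs => rw [← hpartLM]
      simp
    have hcast : ((part.length : Int) - (M.length : Int)) = ((part.length - M.length : Nat) : Int) := by
      omega
    have hlead : PySem.List.slice part none (some ((part.length : Int) - (M.length : Int)))
        = List.takeWhile PySem.Chars.isspace part := by
      rw [hcast, PySem.List.slice_to_natCast]
      have h1 : part.length - M.length = (List.takeWhile PySem.Chars.isspace part).length := by
        conv_lhs => rw [← hpartLM]
        simp
      have h2 := List.take_left (l₁ := List.takeWhile PySem.Chars.isspace part) (l₂ := M)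
      rw [hpartLM] at h2
      rw [h1, h2]
    -- the tail of M after the stripped core
    have hDne : List.dropWhile PySem.Chars.isspace M.reverse ≠ [] := by
      intro h0
      rw [hstripM, h0] at hs
      exact hs rfl
    obtain ⟨d, ds, hD⟩ := List.exists_cons_of_ne_nil hDne
    have hdw : PySem.Chars.isspace d = false := by
      have := List.head_dropWhile_not PySem.Chars.isspace (l := M.reverse) (by rw [hD]; simp)
      simpa [hD] using this
    -- part.rstrip() = leading ++ stripped core
    have hrst : PySem.Chars.rstrip part
        = List.takeWhile PySem.Chars.isspace part ++ PySem.Chars.strip part := by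
      rw [PySem.Chars.rstrip]
      have hrev : part.reverse = List.takeWhile PySem.Chars.isspace M.reverse
          ++ (List.dropWhile PySem.Chars.isspace M.reverse ++ (List.takeWhile PySem.Chars.isspace part).reverse) := by
        symm
        rw [← List.append_assoc, hMrev]
        conv_rhs => rw [← hpartLM]
        simp
      rw [hrev]
      have hdrop : List.dropWhile PySem.Chars.isspace
            (List.takeWhile PySem.Chars.isspace M.reverse
              ++ (List.dropWhile PySem.Chars.isspace M.reverse ++ (List.takeWhile PySem.Chars.isspace part).reverse))
          = List.dropWhile PySem.Chars.isspace M.reverse ++ (List.takeWhile PySem.Chars.isspace part).reverse := by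
        rw [dropWhile_all_append _ _ _ (fun x hx => List.mem_takeWhile_imp hx), hD]
        simp [hdw]
      rw [hdrop, hstripM]
      simp
    -- trailing whitespace
    have hp2 : part = (List.takeWhile PySem.Chars.isspace part ++ PySem.Chars.strip part)
        ++ (List.takeWhile PySem.Chars.isspace M.reverse).reverse := by
      conv_lhs => rw [← hpartLM]
      conv_lhs => rw [hMdecomp]
      simp
    have htrail : PySem.List.slice part (some ((PySem.Chars.rstrip part).length : Int)) none
        = (List.takeWhile PySem.Chars.isspace M.reverse).reverse := by
      have h3 := List.drop_left (l₁ := List.takeWhile PySem.Chars.isspace part ++ PySem.Chars.strip part)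
        (l₂ := (List.takeWhile PySem.Chars.isspace M.reverse).reverse)
      rw [← hp2] at h3
      rw [PySem.List.slice_from_natCast, hrst]
      exact h3
    -- the first stripped character is not whitespace
    have hheadM : M = c :: (rest ++ (List.takeWhile PySem.Chars.isspace M.reverse).reverse) := by
      conv_lhs => rw [hMdecomp]
      rw [he]
      simp
    have hdrop2 : List.dropWhile PySem.Chars.isspace part
        = c :: (rest ++ (List.takeWhile PySem.Chars.isspace M.reverse).reverse) := hheadM
    have hcw : PySem.Chars.isspace c = false := by
      have := List.head_dropWhile_not PySem.Chars.isspace (l := part) (by rw [hdrop2]; simp)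
      simpa [hdrop2] using this
    -- assemble
    rw [hlead, htrail, he]
    have hpart2 : part = List.takeWhile PySem.Chars.isspace part
        ++ (c :: (rest ++ (List.takeWhile PySem.Chars.isspace M.reverse).reverse)) := by
      conv_lhs => rw [← hpartLM]
      conv_lhs => rw [hheadM]
    conv_rhs => rw [hpart2]
    rw [capNW_ws_append _ _ (fun x hx => List.mem_takeWhile_imp hx)]
    simp [capNW, hcw]

lemma scan_capFirst (P : Char → Bool) (hPu : ∀ c, P (PySem.Chars.upperChar c) = P c) (t : List Char) :
    scanG P true (match t with
      | [] => t
      | c :: _ => PySem.Chars.upperChar c :: PySem.List.slice t (some 1) none) = scanG P true t := by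
  cases t with
  | nil => rfl
  | cons c cs =>
    simp only [PySem.List.slice_from_one, List.tail_cons]
    by_cases hw : PySem.Chars.isspace c = true
    · simp [scanG, hw, ws_upC, hPu, upC_of_ws c hw]
    · simp only [Bool.not_eq_true] at hw
      simp [scanG, hw, ws_upC, hPu, upC_upC]

lemma scan_fuse (P Q R : Char → Bool) (hR : ∀ c, R c = (P c || Q c)) (hPu : ∀ c, P (PySem.Chars.upperChar c) = P c) :
    ∀ (l : List Char) (a b : Bool), scanG P a (scanG Q b l) = scanG R (a || b) l := by
  intro l
  induction l with
  | nil => intro a b; rfl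
  | cons c cs ih =>
    intro a b
    simp only [scanG]
    by_cases hw : PySem.Chars.isspace c = true
    · by_cases hp : P c = true <;> by_cases hq : Q c = true <;>
        cases a <;> cases b <;>
          simp [scanG, hp, hq, hR c, hw, ih]
    · simp only [Bool.not_eq_true] at hw
      by_cases hp : P c = true <;> by_cases hq : Q c = true <;>
        cases a <;> cases b <;>
          simp [scanG, hp, hq, hR c, hw, ws_upC, hPu, upC_upC, ih]

lemma scanB_eq : ∀ (l : List Char) (st : List Char × Bool),
    (l.foldl (fun (st : List Char × Bool) ch =>
      let st2 := if st.2 && !(PySem.Chars.isspace ch) then (st.1 ++ [PySem.Chars.upperChar ch], false)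
                 else (st.1 ++ [ch], st.2)
      (st2.1, if ch = '.' ∨ ch = '!' ∨ ch = '?' then true else st2.2)) st).1
    = st.1 ++ scanG (fun c => (c == '?') || ((c == '!') || (c == '.'))) st.2 l := by
  intro l
  induction l with
  | nil => intro st; simp [scanG]
  | cons c cs ih =>
    intro st
    obtain ⟨out, cap⟩ := st
    rw [List.foldl_cons, ih]
    by_cases hc : c = '.' ∨ c = '!' ∨ c = '?'
    · have hc' : ((c == '?') || ((c == '!') || (c == '.'))) = true := by
        rcases hc with h | h | h <;> simp [h]
      cases cap <;> by_cases hw : PySem.Chars.isspace c = true <;>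
        simp [scanG, hc, hc', hw]
    · have hc' : ((c == '?') || ((c == '!') || (c == '.'))) = false := by
        simp only [Bool.or_eq_false_iff, beq_eq_false_iff_ne]
        refine ⟨?_, ?_, ?_⟩ <;> (intro h; exact hc (by tauto))
      cases cap <;> by_cases hw : PySem.Chars.isspace c = true <;>
        simp [scanG, hc, hc', hw]

lemma passA_eq_scan (p : Char) (hup : PySem.Chars.upperChar p = p) (s : List Char) :
    capPassA p s = scanG (· == p) true s := by
  have hfold := foldl_enum_set (α := List Char)
    (fun part => PySem.List.slice part none (some ((part.length : Int) - ((PySem.Chars.lstrip part).length : Int)))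
       ++ (match PySem.Chars.strip part with
           | [] => []
           | c :: rest => PySem.Chars.upperChar c :: rest)
       ++ PySem.List.slice part (some ((PySem.Chars.rstrip part).length : Int)) none)
    (fun part => PySem.Chars.strip part ≠ []) (List.splitOnP (· == p) s) []
  simp only [List.nil_append, List.length_nil, Nat.cast_zero] at hfold
  simp only [capPassA]
  rw [splitOn_eq]
  rw [hfold]
  have hcap : (fun (x : List Char) => if PySem.Chars.strip x ≠ [] then
      PySem.List.slice x none (some ((x.length : Int) - ((PySem.Chars.lstrip x).length : Int)))
       ++ (match PySem.Chars.strip x with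
           | [] => []
           | c :: rest => PySem.Chars.upperChar c :: rest)
       ++ PySem.List.slice x (some ((PySem.Chars.rstrip x).length : Int)) none
      else x) = capNW := funext fun x => part_fix_eq_capNW x
  rw [hcap]
  rw [← scan_join (· == p) p (by simp) hup _ (mem_splitOnP (· == p) s)]
  have hjoin : PySem.Chars.join [p] (List.splitOnP (· == p) s) = s :=
    List.intercalate_splitOn s p
  rw [hjoin]

lemma upC_punct (p : Char) (h1 : p.toNat < 97) : PySem.Chars.upperChar p = p := by
  apply upC_of_not_lower
  rw [← Bool.not_eq_true]
  intro hcon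
  obtain ⟨g1, g2⟩ := (islower_iff _).mp hcon
  omega

lemma beq_upC_punct (p : Char) (hp : p.toNat < 65) : ∀ c, ((PySem.Chars.upperChar c == p)) = (c == p) := by
  intro c
  have h := upC_eq_iff c p (Or.inl hp) (Or.inl (by omega))
  by_cases he : c = p
  · simp [he, upC_punct p (by omega)]
  · have : ¬ PySem.Chars.upperChar c = p := fun hh => he (h.mp hh)
    simp [he, this]

lemma ports_agree (text : String) : capitalize_dialogue text = capitalize_dialogue_alt text := by
  by_cases h : text = ""
  · simp [capitalize_dialogue, capitalize_dialogue_alt, h]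
  · simp only [capitalize_dialogue, capitalize_dialogue_alt, if_neg h]
    generalize capPre text = t
    congr 1
    simp only [List.foldl_cons, List.foldl_nil]
    rw [passA_eq_scan '.' (upC_punct '.' (by decide))]
    rw [scan_capFirst (· == '.') (fun c => beq_upC_punct '.' (by decide) c)]
    rw [passA_eq_scan '!' (upC_punct '!' (by decide))]
    rw [scan_fuse (· == '!') (· == '.') (fun c => (c == '!') || (c == '.'))
        (fun c => rfl) (fun c => beq_upC_punct '!' (by decide) c) t true true]
    simp only [Bool.or_self]
    rw [passA_eq_scan '?' (upC_punct '?' (by decide))]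
    rw [scan_fuse (· == '?') (fun c => (c == '!') || (c == '.'))
        (fun c => (c == '?') || ((c == '!') || (c == '.')))
        (fun c => rfl) (fun c => beq_upC_punct '?' (by decide) c) t true true]
    simp only [Bool.or_self, capScanB]
    rw [scanB_eq]
    simp


-- ===== VERDICT (by name: the statement is the Claim_ definition above) =====
theorem capitalize_dialogue_spec : Claim_equal_capitalize_dialogue := by
  intro text _
  show capitalize_dialogue text = capitalize_dialogue_alt text
  exact ports_agree text
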